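-- pv_equiv track=rewrite | github.com/E471r/BG | prior.py | get_gather_inds_
-- ===== SOURCE A (Python) =====
-- def get_gather_inds_(ragged):
--     gather_inds = []
--     a = 0
--     for i in range(len(ragged)):
--         inds = []
--         for k in range(len(ragged[i])):
--             inds.append(a)
--             a+=1
--         gather_inds.append(inds)
--     return gather_inds
-- ===== SOURCE B (Python) =====
-- def get_gather_inds_(ragged):
--     lengths = [len(row) for row in ragged]
--     flat = list(range(sum(lengths)))
--     out = []
--     start = 0
--     for n in lengths:
--         out.append(flat[start:start+n])
--         start += n
--     return out
-- ===== Notes on version B (the rewrite author's own statement) =====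
-- stated objective: alternative
-- what changed: A builds each index with one interleaved global counter incremented per element; B first materializes the full flat index table list(range(sum(lengths))) and then partitions it by slicing at running offsets computed from the row lengths.
import Mathlib
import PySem

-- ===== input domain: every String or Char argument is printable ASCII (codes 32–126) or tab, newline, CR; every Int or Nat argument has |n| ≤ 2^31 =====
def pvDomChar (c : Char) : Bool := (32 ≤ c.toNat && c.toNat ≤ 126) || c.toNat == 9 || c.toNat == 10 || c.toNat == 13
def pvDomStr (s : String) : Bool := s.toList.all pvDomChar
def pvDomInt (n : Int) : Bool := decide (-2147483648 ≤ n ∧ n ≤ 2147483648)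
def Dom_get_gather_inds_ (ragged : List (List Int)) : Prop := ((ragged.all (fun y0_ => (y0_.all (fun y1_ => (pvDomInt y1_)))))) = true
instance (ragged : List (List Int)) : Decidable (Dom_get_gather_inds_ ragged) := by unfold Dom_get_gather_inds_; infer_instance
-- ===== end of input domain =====

-- B replaces A's interleaved per-element counter with a flat index table built once and
-- partitioned by slicing at running offsets (objective: alternative decomposition, same cost).

-- ===== PORT A =====
-- body of A's outer loop: inner loop appends the running counter a and increments it
def pvStepA (st : List (List Int) × Int) (row : List Int) : List (List Int) × Int :=
  let inner := (PySem.List.pyRange 0 (row.length : Int) 1).foldl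
    (fun (st2 : List Int × Int) _ => (st2.1 ++ [st2.2], st2.2 + 1)) ([], st.2)
  (st.1 ++ [inner.1], inner.2)

def get_gather_inds_ (ragged : List (List Int)) : List (List Int) :=
  (ragged.foldl pvStepA ([], 0)).1

-- ===== PORT B =====
-- lengths table, full flat index list, then slice it at running offsets
def get_gather_inds__alt (ragged : List (List Int)) : List (List Int) :=
  let lengths : List Int := ragged.map (fun row => (row.length : Int))
  let flat := PySem.List.pyRange 0 lengths.sum 1
  (lengths.foldl
    (fun (st : List (List Int) × Int) n =>
      (st.1 ++ [PySem.List.slice flat (some st.2) (some (st.2 + n))], st.2 + n))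
    ([], 0)).1

-- ===== PRECONDITION & SPEC =====
def Spec_get_gather_inds_ (ragged : List (List Int)) (out : List (List Int)) : Prop := out = get_gather_inds__alt ragged
instance (ragged : List (List Int)) (out : List (List Int)) : Decidable (Spec_get_gather_inds_ ragged out) := by unfold Spec_get_gather_inds_; infer_instance

-- ===== CLAIM (what is proved, stated in full; the proofs are below) =====
def Claim_equal_get_gather_inds_ : Prop := ∀ (ragged : List (List Int)), Dom_get_gather_inds_ ragged → Spec_get_gather_inds_ ragged (get_gather_inds_ ragged)

-- ===== LEMMAS AND PROOFS =====

-- canonical value: consecutive blocks of the given lengths starting at `a`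
def pvBlocks : List Int → Int → List (List Int)
  | [], _ => []
  | n :: rest, a => PySem.List.pyRange a (a + n) 1 :: pvBlocks rest (a + n)

-- A's inner loop: appending-and-incrementing over any list of length n yields one block
lemma pvInnerA (l : List Int) (acc : List Int) (a : Int) :
    l.foldl (fun (st2 : List Int × Int) _ => (st2.1 ++ [st2.2], st2.2 + 1)) (acc, a)
      = (acc ++ PySem.List.pyRange a (a + (l.length : Int)) 1, a + (l.length : Int)) := by
  induction l generalizing acc a with
  | nil => simp [PySem.List.pyRange_one_eq_nil (le_refl a)]
  | cons x xs ih =>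
      simp only [List.foldl_cons, ih]
      have h : a + (((x :: xs).length : Nat) : Int) = (a + 1) + ((xs.length : Nat) : Int) := by
        push_cast [List.length_cons]; omega
      rw [h, PySem.List.pyRange_one_cons (by omega : a < a + 1 + ((xs.length : Nat) : Int))]
      simp

-- A's outer loop produces the blocks of the rows' lengths
lemma pvOuterA (ragged : List (List Int)) (acc : List (List Int)) (a : Int) :
    (ragged.foldl pvStepA (acc, a)).1
      = acc ++ pvBlocks (ragged.map (fun row => (row.length : Int))) a := by
  induction ragged generalizing acc a with
  | nil => simp [pvBlocks]
  | cons r rs ih =>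
      have hlen : (((PySem.List.pyRange 0 (r.length : Int) 1).length : Nat) : Int)
          = (r.length : Int) := by
        rw [PySem.List.length_pyRange_one]; omega
      have hstep : pvStepA (acc, a) r
          = (acc ++ [PySem.List.pyRange a (a + (r.length : Int)) 1], a + (r.length : Int)) := by
        simp only [pvStepA, pvInnerA, List.nil_append, hlen]
      rw [List.foldl_cons, hstep, ih]
      simp [pvBlocks, List.append_assoc]

-- slicing the flat table [0, T) at [a, b) is exactly the block [a, b)
lemma pvSliceBlock (T a b : Int) (h0 : 0 ≤ a) (hab : a ≤ b) (hbT : b ≤ T) :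
    PySem.List.slice (PySem.List.pyRange 0 T 1) (some a) (some b) = PySem.List.pyRange a b 1 := by
  rw [PySem.List.slice_toNat _ h0 (le_trans h0 hab)]
  rw [PySem.List.pyRange_one_append 0 a T h0 (le_trans hab hbT)]
  have h1 : a.toNat = (PySem.List.pyRange 0 a 1).length := by
    rw [PySem.List.length_pyRange_one]; omega
  have h2 : b.toNat - a.toNat = (PySem.List.pyRange a b 1).length := by
    rw [PySem.List.length_pyRange_one]; omega
  rw [h2, h1, List.drop_left]
  rw [PySem.List.pyRange_one_append a b T hab hbT, List.take_left]

-- B's partitioning loop produces the same blocks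
lemma pvOuterB (T : Int) (lengths : List Int) (acc : List (List Int)) (start : Int)
    (hnn : ∀ n ∈ lengths, 0 ≤ n) (hs : 0 ≤ start) (hT : start + lengths.sum ≤ T) :
    (lengths.foldl
      (fun (st : List (List Int) × Int) n =>
        (st.1 ++ [PySem.List.slice (PySem.List.pyRange 0 T 1) (some st.2) (some (st.2 + n))], st.2 + n))
      (acc, start)).1
      = acc ++ pvBlocks lengths start := by
  induction lengths generalizing acc start with
  | nil => simp [pvBlocks]
  | cons n rest ih =>
      simp only [List.sum_cons] at hT
      have hn : 0 ≤ n := hnn n (List.mem_cons_self ..)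
      have hrest : ∀ x ∈ rest, 0 ≤ x := fun x hx => hnn x (List.mem_cons_of_mem _ hx)
      have hsum : 0 ≤ rest.sum := List.sum_nonneg hrest
      simp only [List.foldl_cons]
      rw [ih _ _ hrest (by omega) (by omega)]
      rw [pvSliceBlock T start (start + n) hs (by omega) (by omega)]
      simp [pvBlocks, List.append_assoc]

-- ===== VERDICT (by name: the statement is the Claim_ definition above) =====
theorem get_gather_inds__spec : Claim_equal_get_gather_inds_ := by
  intro ragged _
  unfold Spec_get_gather_inds_
  simp only [get_gather_inds_, get_gather_inds__alt]
  have hnn : ∀ n ∈ ragged.map (fun row => ((row.length : Nat) : Int)), 0 ≤ n := by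
    intro n hn
    simp only [List.mem_map] at hn
    obtain ⟨row, -, rfl⟩ := hn
    positivity
  rw [pvOuterA, pvOuterB _ _ _ _ hnn le_rfl (by simp)]
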